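-- pv_equiv track=rewrite | github.com/seovalue/Algorithm | python/code/코드챌린지_10_4.py | compare_string
-- ===== SOURCE A (Python) =====
-- def compare_string(string):
--     size = len(string)
--     for i in range(size):
--         comp = string[i]
--         for j in range(size):
--             if comp != string[j]:
--                 return False
--     return True
-- ===== SOURCE B (Python) =====
-- def compare_string(string):
--     return string == string[:1] * len(string)
-- ===== Notes on version B (the rewrite author's own statement) =====
-- stated objective: simpler
-- what changed: Replaces the quadratic nested pairwise index scan with building the reference string string[:1]*len(string) and one equality test.
import Mathlib
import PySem

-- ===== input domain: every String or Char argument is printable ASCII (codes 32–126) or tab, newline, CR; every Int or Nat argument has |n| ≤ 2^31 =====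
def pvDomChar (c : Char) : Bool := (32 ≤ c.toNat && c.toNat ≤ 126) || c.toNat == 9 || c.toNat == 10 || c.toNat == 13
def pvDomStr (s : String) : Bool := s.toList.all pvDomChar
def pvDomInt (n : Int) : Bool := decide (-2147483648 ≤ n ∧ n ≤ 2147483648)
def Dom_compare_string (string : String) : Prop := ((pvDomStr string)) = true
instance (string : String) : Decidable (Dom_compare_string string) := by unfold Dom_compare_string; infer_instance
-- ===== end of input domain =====

-- B replaces A's quadratic nested pairwise index scan by one equality test against string[:1] * len(string).

-- ===== PORT A =====
-- inner loop: for j in range(size): if comp != string[j]: return False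
def pvAInner (cs : List Char) (comp : Char) : List Int → Bool
  | [] => true
  | j :: js => if comp ≠ PySem.List.pyGetD cs j 'A' then false else pvAInner cs comp js
-- outer loop over i in range(size); the default 'A' of pyGetD is never read: every index is in range
def pvAOuter (cs : List Char) : List Int → Bool
  | [] => true
  | i :: is =>
    let comp := PySem.List.pyGetD cs i 'A'
    if pvAInner cs comp (PySem.List.pyRange 0 cs.length 1) then pvAOuter cs is else false

def compare_string (string : String) : Bool :=
  let cs := string.toList
  pvAOuter cs (PySem.List.pyRange 0 cs.length 1)

-- ===== PORT B =====
-- string == string[:1] * len(string)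
def compare_string_alt (string : String) : Bool :=
  string.toList == (List.replicate string.toList.length
    (PySem.List.slice string.toList none (some 1))).flatten

-- ===== PRECONDITION & SPEC =====
def Spec_compare_string (string : String) (out : Bool) : Prop := out = compare_string_alt string
instance (string : String) (out : Bool) : Decidable (Spec_compare_string string out) := by unfold Spec_compare_string; infer_instance

-- ===== CLAIM (what is proved, stated in full; the proofs are below) =====
def Claim_equal_compare_string : Prop := ∀ (string : String), Dom_compare_string string → Spec_compare_string string (compare_string string)

-- ===== LEMMAS AND PROOFS =====
theorem pvAInner_all (cs : List Char) (comp : Char) (js : List Int) :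
    pvAInner cs comp js = js.all (fun j => comp == PySem.List.pyGetD cs j 'A') := by
  induction js with
  | nil => rfl
  | cons j js ih =>
    simp only [pvAInner, List.all_cons, ih]
    by_cases h : comp = PySem.List.pyGetD cs j 'A' <;> simp [h]

theorem pvAOuter_all (cs : List Char) (is : List Int) :
    pvAOuter cs is =
      is.all (fun i => pvAInner cs (PySem.List.pyGetD cs i 'A') (PySem.List.pyRange 0 cs.length 1)) := by
  induction is with
  | nil => rfl
  | cons i is ih =>
    simp only [pvAOuter, List.all_cons, ih]
    by_cases h : pvAInner cs (PySem.List.pyGetD cs i 'A') (PySem.List.pyRange 0 cs.length 1) <;>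
      simp [h]

theorem pvAInner_range (cs : List Char) (comp : Char) :
    pvAInner cs comp (PySem.List.pyRange 0 cs.length 1) = cs.all (fun x => comp == x) := by
  rw [pvAInner_all]
  have h := PySem.List.map_pyGetD_pyRange_zero' cs 'A'
  calc (PySem.List.pyRange 0 cs.length 1).all (fun j => comp == PySem.List.pyGetD cs j 'A')
      = ((PySem.List.pyRange 0 cs.length 1).map (fun j => PySem.List.pyGetD cs j 'A')).all
          (fun x => comp == x) := by rw [List.all_map]; rfl
    _ = cs.all (fun x => comp == x) := by rw [h]

theorem compare_string_all (string : String) :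
    compare_string string =
      string.toList.all (fun comp => string.toList.all (fun x => comp == x)) := by
  unfold compare_string
  rw [pvAOuter_all]
  have : ∀ i, pvAInner string.toList (PySem.List.pyGetD string.toList i 'A')
      (PySem.List.pyRange 0 string.toList.length 1)
      = string.toList.all (fun x => PySem.List.pyGetD string.toList i 'A' == x) :=
    fun i => pvAInner_range _ _
  simp only [this]
  calc (PySem.List.pyRange 0 string.toList.length 1).all
        (fun i => string.toList.all (fun x => PySem.List.pyGetD string.toList i 'A' == x))
      = ((PySem.List.pyRange 0 string.toList.length 1).map
          (fun i => PySem.List.pyGetD string.toList i 'A')).all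
          (fun comp => string.toList.all (fun x => comp == x)) := by rw [List.all_map]; rfl
    _ = _ := by rw [PySem.List.map_pyGetD_pyRange_zero']

theorem slice_to_one (cs : List Char) : PySem.List.slice cs none (some 1) = cs.take 1 := by
  rw [PySem.List.slice_to cs (b := 1) (by omega)]; rfl

-- ===== VERDICT (by name: the statement is the Claim_ definition above) =====
theorem compare_string_spec : Claim_equal_compare_string := by
  intro string _
  unfold Spec_compare_string
  rw [compare_string_all]
  unfold compare_string_alt
  rw [slice_to_one]
  cases hcs : string.toList with
  | nil => rfl
  | cons c rest =>
    simp only [List.take_succ_cons, List.take_zero, List.flatten_replicate_singleton]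
    rw [Bool.eq_iff_iff]
    simp only [List.all_cons, List.all_eq_true, beq_iff_eq, Bool.and_eq_true,
      List.length_cons, List.replicate_succ, List.cons.injEq, beq_iff_eq,
      List.eq_replicate_iff]
    constructor
    · rintro ⟨⟨-, hc⟩, -⟩
      exact ⟨trivial, trivial, fun b hb => (hc b hb).symm⟩
    · rintro ⟨-, -, hr⟩
      have hall : ∀ x ∈ rest, c = x := fun b hb => (hr b hb).symm
      refine ⟨⟨trivial, hall⟩, ?_⟩
      intro a ha
      rw [hr a ha]
      exact ⟨rfl, hall⟩
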